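-- pv_equiv track=rewrite | github.com/LynxTWO/mix-marriage-offline | src/mmo/core/variants.py | _suffix_from_index
-- ===== SOURCE A (Python) =====
-- def _suffix_from_index(index: int) -> str:
--     if index < 0:
--         raise ValueError("index must be >= 0")
--     chars: list[str] = []
--     current = index
--     while True:
--         chars.append(chr(ord("a") + (current % 26)))
--         current = (current // 26) - 1
--         if current < 0:
--             break
--     return "".join(reversed(chars))
-- ===== SOURCE B (Python) =====
-- def _suffix_from_index(index: int) -> str:
--     if index < 0:
--         raise ValueError("index must be >= 0")
--
--     def rec(n: int) -> str:
--         if n < 0: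
--             return ""
--         return rec(n // 26 - 1) + chr(ord("a") + n % 26)
--
--     return rec(index)
-- ===== Notes on version B (the rewrite author's own statement) =====
-- stated objective: simpler
-- what changed: Replaces the iterative accumulate-digits-into-a-list-then-reverse loop by a direct recursive bijective-base-26 conversion that builds the string most-significant-first, eliminating the list and the reversal.
import Mathlib
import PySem

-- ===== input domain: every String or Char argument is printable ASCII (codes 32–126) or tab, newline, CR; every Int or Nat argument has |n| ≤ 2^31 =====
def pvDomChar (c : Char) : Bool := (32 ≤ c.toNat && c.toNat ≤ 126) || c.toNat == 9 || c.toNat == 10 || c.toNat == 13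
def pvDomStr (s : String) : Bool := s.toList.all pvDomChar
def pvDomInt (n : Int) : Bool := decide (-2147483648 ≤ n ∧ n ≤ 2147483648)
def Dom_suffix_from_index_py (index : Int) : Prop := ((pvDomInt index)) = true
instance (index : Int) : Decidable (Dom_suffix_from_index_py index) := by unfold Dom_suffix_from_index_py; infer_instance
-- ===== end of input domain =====

-- B replaces A's accumulate-then-reverse loop by a direct recursion building the
-- string most-significant-first (objective: simpler; equivalence on index ≥ 0).

-- ===== PORT A =====
-- chr(ord("a") + (n % 26))   (Python % 26, floor mod)
def pvChr26 (n : Int) : Char := Char.ofNat (97 + (PySem.Int.mod n 26).toNat)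

-- A's while-loop: appends digits to `chars`, then the caller reverses and joins.
def pvALoop (current : Int) (chars : List Char) : List Char :=
  let chars' := chars ++ [pvChr26 current]
  let next := PySem.Int.floordiv current 26 - 1
  if next < 0 then chars' else pvALoop next chars'
termination_by (current + 1).toNat
decreasing_by
  rename_i h
  have h26 : PySem.Int.floordiv current 26 = current / 26 :=
    PySem.Int.floordiv_eq_ediv_of_pos (by omega)
  simp only [next] at h
  rw [h26] at h
  omega

def suffix_from_index_py (index : Int) : String :=
  -- index < 0 raises ValueError (excluded by Pre_)
  String.ofList ((pvALoop index []).reverse)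

-- ===== PORT B =====
-- rec(n) = "" if n < 0 else rec(n // 26 - 1) + chr(ord("a") + n % 26)
def pvBRec (n : Int) : List Char :=
  if n < 0 then []
  else pvBRec (PySem.Int.floordiv n 26 - 1) ++ [pvChr26 n]
termination_by (n + 1).toNat
decreasing_by
  rename_i h
  have h26 : PySem.Int.floordiv n 26 = n / 26 :=
    PySem.Int.floordiv_eq_ediv_of_pos (by omega)
  rw [h26]
  omega

def suffix_from_index_py_alt (index : Int) : String :=
  -- index < 0 raises ValueError (excluded by Pre_)
  String.ofList (pvBRec index)

-- ===== PRECONDITION & SPEC =====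
-- Pre_ excludes exactly index < 0, where Python A raises ValueError.
def Pre_suffix_from_index_py (index : Int) : Prop := 0 ≤ index
instance (index : Int) : Decidable (Pre_suffix_from_index_py index) := by
  unfold Pre_suffix_from_index_py; infer_instance

def pvWitness_suffix_from_index_py : Int := (27)

def Spec_suffix_from_index_py (index : Int) (out : String) : Prop := out = suffix_from_index_py_alt index
instance (index : Int) (out : String) : Decidable (Spec_suffix_from_index_py index out) := by unfold Spec_suffix_from_index_py; infer_instance

-- ===== CLAIM (what is proved, stated in full; the proofs are below) =====
def Claim_equal_suffix_from_index_py : Prop := ∀ (index : Int), Dom_suffix_from_index_py index → Pre_suffix_from_index_py index → Spec_suffix_from_index_py index (suffix_from_index_py index)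

-- ===== LEMMAS AND PROOFS =====

theorem pvALoop_eq (current : Int) (chars : List Char) : pvALoop current chars =
    if PySem.Int.floordiv current 26 - 1 < 0 then chars ++ [pvChr26 current]
    else pvALoop (PySem.Int.floordiv current 26 - 1) (chars ++ [pvChr26 current]) := by
  rw [pvALoop]

theorem pvBRec_eq (n : Int) : pvBRec n =
    if n < 0 then []
    else pvBRec (PySem.Int.floordiv n 26 - 1) ++ [pvChr26 n] := by
  rw [pvBRec]

-- A's loop accumulator is pure append.
theorem pvALoop_append (k : Nat) : ∀ (current : Int) (chars : List Char),
    (current + 1).toNat ≤ k → pvALoop current chars = chars ++ pvALoop current [] := by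
  induction k with
  | zero =>
    intro current chars hk
    have h26 : PySem.Int.floordiv current 26 = current / 26 :=
      PySem.Int.floordiv_eq_ediv_of_pos (by omega)
    have hneg : PySem.Int.floordiv current 26 - 1 < 0 := by rw [h26]; omega
    rw [pvALoop_eq current chars, pvALoop_eq current [], if_pos hneg, if_pos hneg]
    simp
  | succ k ih =>
    intro current chars hk
    have h26 : PySem.Int.floordiv current 26 = current / 26 :=
      PySem.Int.floordiv_eq_ediv_of_pos (by omega)
    rw [pvALoop_eq current chars, pvALoop_eq current []]
    by_cases hneg : PySem.Int.floordiv current 26 - 1 < 0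
    · rw [if_pos hneg, if_pos hneg]
      simp
    · simp only [if_neg hneg, List.nil_append]
      have hb : (PySem.Int.floordiv current 26 - 1 + 1).toNat ≤ k := by rw [h26] at hneg ⊢; omega
      rw [ih _ (chars ++ [pvChr26 current]) hb, ih _ [pvChr26 current] hb]
      simp

-- Reversing A's digit list gives B's recursion.
theorem pvALoop_reverse (k : Nat) : ∀ (current : Int),
    (current + 1).toNat ≤ k → 0 ≤ current → (pvALoop current []).reverse = pvBRec current := by
  induction k with
  | zero => intro current hk h0; omega
  | succ k ih =>
    intro current hk h0
    have h26 : PySem.Int.floordiv current 26 = current / 26 :=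
      PySem.Int.floordiv_eq_ediv_of_pos (by omega)
    rw [pvALoop_eq current [], pvBRec_eq current]
    by_cases hneg : PySem.Int.floordiv current 26 - 1 < 0
    · rw [if_pos hneg, if_neg (not_lt.mpr h0),
        pvBRec_eq (PySem.Int.floordiv current 26 - 1), if_pos hneg]
      simp
    · simp only [if_neg hneg, if_neg (not_lt.mpr h0), List.nil_append]
      have hb : (PySem.Int.floordiv current 26 - 1 + 1).toNat ≤ k := by rw [h26] at hneg ⊢; omega
      rw [pvALoop_append k _ [pvChr26 current] hb]
      simp only [List.reverse_append, List.reverse_cons, List.reverse_nil, List.nil_append]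
      rw [ih _ hb (by omega)]

-- ===== VERDICT (by name: the statement is the Claim_ definition above) =====
theorem suffix_from_index_py_spec : Claim_equal_suffix_from_index_py := by
  intro index _ hpre
  unfold Spec_suffix_from_index_py suffix_from_index_py suffix_from_index_py_alt
  rw [pvALoop_reverse (index + 1).toNat index (le_refl _) hpre]
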